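-- pv_equiv track=rewrite | github.com/ibis-project/ibis | ibis/backends/sql/compilers/singlestoredb.py | _convert_perl_to_posix_regex
-- ===== SOURCE A (Python) =====
-- def _convert_perl_to_posix_regex(pattern):
--     """Convert Perl-style regex patterns to POSIX patterns for SingleStoreDB.
--
--     SingleStoreDB uses POSIX regex, not Perl-style patterns.
--     """
--     if isinstance(pattern, str):
--         # Convert common Perl patterns to POSIX equivalents
--         conversions = {
--             r"\d": "[0-9]",
--             r"\D": "[^0-9]",
--             r"\w": "[[:alnum:]_]",
--             r"\W": "[^[:alnum:]_]",
--             r"\s": "[[:space:]]",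
--             r"\S": "[^[:space:]]",
--         }
--
--         result = pattern
--         for perl_pattern, posix_pattern in conversions.items():
--             result = result.replace(perl_pattern, posix_pattern)
--         return result
--     return pattern
-- ===== SOURCE B (Python) =====
-- def _convert_perl_to_posix_regex(pattern):
--     """Convert Perl-style regex patterns to POSIX patterns for SingleStoreDB.
--
--     Single left-to-right scan replacing each escape token once, instead of
--     six sequential full passes over the string.
--     """
--     if isinstance(pattern, str):
--         conversions = {
--             r"\d": "[0-9]",
--             r"\D": "[^0-9]",
--             r"\w": "[[:alnum:]_]",
--             r"\W": "[^[:alnum:]_]",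
--             r"\s": "[[:space:]]",
--             r"\S": "[^[:space:]]",
--         }
--         out = []
--         i = 0
--         n = len(pattern)
--         while i < n:
--             rep = conversions.get(pattern[i:i + 2])
--             if rep is not None:
--                 out.append(rep)
--                 i += 2
--             else:
--                 out.append(pattern[i])
--                 i += 1
--         return "".join(out)
--     return pattern
-- ===== Notes on version B (the rewrite author's own statement) =====
-- stated objective: alternative
-- what changed: A makes six sequential full str.replace passes over the string (one per escape token); B makes a single left-to-right scan that looks each two-character slice up in the conversions dict and rewrites it once.
import Mathlib
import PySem

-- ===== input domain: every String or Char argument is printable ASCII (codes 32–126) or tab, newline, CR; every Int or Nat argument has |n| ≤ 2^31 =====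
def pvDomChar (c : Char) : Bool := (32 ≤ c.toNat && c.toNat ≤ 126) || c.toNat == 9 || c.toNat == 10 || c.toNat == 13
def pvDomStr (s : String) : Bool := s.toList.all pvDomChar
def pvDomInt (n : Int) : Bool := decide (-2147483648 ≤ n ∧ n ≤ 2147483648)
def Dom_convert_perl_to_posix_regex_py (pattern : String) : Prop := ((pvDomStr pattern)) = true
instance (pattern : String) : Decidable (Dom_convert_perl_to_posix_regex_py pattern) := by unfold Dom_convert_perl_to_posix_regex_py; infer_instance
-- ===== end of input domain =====

-- B replaces A's six sequential full str.replace passes by a single left-to-right scan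
-- that rewrites each escape token once (objective: alternative traversal, same result).
-- Under the type convention the argument is always a String, so A's isinstance(pattern, str)
-- guard is always taken and the non-string passthrough branch has no counterpart here.

-- ===== PORT A =====
-- A: result = pattern, then six sequential str.replace passes in the dict's insertion order.
def convert_perl_to_posix_regex_py (pattern : String) : String :=
  let r1 := PySem.Str.replace pattern "\\d" "[0-9]"
  let r2 := PySem.Str.replace r1 "\\D" "[^0-9]"
  let r3 := PySem.Str.replace r2 "\\w" "[[:alnum:]_]"
  let r4 := PySem.Str.replace r3 "\\W" "[^[:alnum:]_]"
  let r5 := PySem.Str.replace r4 "\\s" "[[:space:]]"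
  let r6 := PySem.Str.replace r5 "\\S" "[^[:space:]]"
  r6

-- ===== PORT B =====
-- conversions.get(pattern[i:i+2]) of Source B: lookup of the two-char slice in the six-entry dict.
def pvConvGet? (a b : Char) : Option (List Char) :=
  if a = '\\' then
    if b = 'd' then some "[0-9]".toList
    else if b = 'D' then some "[^0-9]".toList
    else if b = 'w' then some "[[:alnum:]_]".toList
    else if b = 'W' then some "[^[:alnum:]_]".toList
    else if b = 's' then some "[[:space:]]".toList
    else if b = 'S' then some "[^[:space:]]".toList
    else none
  else none

-- Source B's while loop over i: a two-element slice that is a key advances i by 2 and emits the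
-- replacement, otherwise the single character at i is emitted (the final one-char slice
-- pattern[i:i+2] with i = len-1 is never a key, hence the [a] case).
def pvScan : List Char → List Char
  | [] => []
  | [a] => [a]
  | a :: b :: rest =>
    match pvConvGet? a b with
    | some rep => rep ++ pvScan rest
    | none => a :: pvScan (b :: rest)

def convert_perl_to_posix_regex_py_alt (pattern : String) : String :=
  String.ofList (pvScan pattern.toList)

-- ===== PRECONDITION & SPEC =====
def Spec_convert_perl_to_posix_regex_py (pattern : String) (out : String) : Prop := out = convert_perl_to_posix_regex_py_alt pattern
instance (pattern : String) (out : String) : Decidable (Spec_convert_perl_to_posix_regex_py pattern out) := by unfold Spec_convert_perl_to_posix_regex_py; infer_instance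

-- ===== CLAIM (what is proved, stated in full; the proofs are below) =====
def Claim_equal_convert_perl_to_posix_regex_py : Prop := ∀ (pattern : String), Dom_convert_perl_to_posix_regex_py pattern → Spec_convert_perl_to_posix_regex_py pattern (convert_perl_to_posix_regex_py pattern)

-- ===== LEMMAS AND PROOFS =====

-- One str.replace pass with a two-char needle ['\\', c], written as structural recursion.
def rep2 (c : Char) (r : List Char) : List Char → List Char
  | [] => []
  | [a] => [a]
  | a :: b :: l => if a = '\\' ∧ b = c then r ++ rep2 c r l else a :: rep2 c r (b :: l)

theorem go_spec (c : Char) (r : List Char) : ∀ (fuel : Nat) (l acc : List Char), l.length ≤ fuel →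
    PySem.Chars.replace.go ['\\', c] r fuel l acc = acc.reverse ++ rep2 c r l := by
  intro fuel
  induction fuel with
  | zero => intro l acc h; have : l = [] := by simpa using h
            subst this; simp [PySem.Chars.replace.go, rep2]
  | succ n ih =>
    intro l acc h
    match l with
    | [] => simp [PySem.Chars.replace.go, rep2]
    | [a] =>
      simp only [PySem.Chars.replace.go, List.isPrefixOf]
      simp [ih [] (a :: acc) (by simp), rep2]
    | a :: b :: t =>
      have ht : t.length ≤ n := by simp at h; omega
      have hbt : (b :: t).length ≤ n := by simp at h ⊢; omega
      by_cases hm : a = '\\' ∧ b = c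
      · obtain ⟨rfl, rfl⟩ := hm
        simp only [PySem.Chars.replace.go, List.isPrefixOf]
        simp [ih t (r.reverse ++ acc) ht, rep2]
      · simp only [PySem.Chars.replace.go, List.isPrefixOf]
        have hcond : ¬('\\' == a && (c == b && true)) = true := by
          simp only [Bool.and_true, Bool.and_eq_true, beq_iff_eq, not_and]
          exact fun h1 h2 => hm ⟨h1.symm, h2.symm⟩
        rw [if_neg hcond, ih (b :: t) (a :: acc) hbt]
        simp [rep2, hm]

theorem replace_eq_rep2 (c : Char) (r : List Char) (l : List Char) :
    PySem.Chars.replace l ['\\', c] r = rep2 c r l := by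
  simp [PySem.Chars.replace, go_spec c r l.length l [] le_rfl]

theorem rep2_cons_ne (c : Char) (r : List Char) (a : Char) (l : List Char) (h : a ≠ '\\') :
    rep2 c r (a :: l) = a :: rep2 c r l := by
  cases l <;> simp [rep2, h]

theorem rep2_bs_cons (c : Char) (r : List Char) (l : List Char) (h : l.head? ≠ some c) :
    rep2 c r ('\\' :: l) = '\\' :: rep2 c r l := by
  cases l with
  | nil => simp [rep2]
  | cons b t => simp at h; simp [rep2, h]

theorem rep2_match (c : Char) (r : List Char) (l : List Char) :
    rep2 c r ('\\' :: c :: l) = r ++ rep2 c r l := by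
  simp [rep2]

theorem rep2_append (c : Char) (r : List Char) (p l : List Char) (h : '\\' ∉ p) :
    rep2 c r (p ++ l) = p ++ rep2 c r l := by
  induction p with
  | nil => rfl
  | cons a q ih =>
    simp at h
    rw [List.cons_append, rep2_cons_ne c r a (q ++ l) (fun hh => h.1 hh.symm), ih h.2, List.cons_append]

theorem rep2_head (c : Char) (r : List Char) (l : List Char) (hr : r ≠ []) :
    (rep2 c r l).head? = l.head? ∨ (rep2 c r l).head? = r.head? := by
  match l with
  | [] => left; rfl
  | [a] => left; rfl
  | a :: b :: t =>
    by_cases hm : a = '\\' ∧ b = c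
    · right
      obtain ⟨rh, rt, rfl⟩ := List.exists_cons_of_ne_nil hr
      simp [rep2, hm]
    · left; simp [rep2, hm]

-- a pass-through step: a token pass leaves '\\' followed by a non-matching letter alone
theorem pass_through (tok : Char) (r : List Char) (c : Char) (t : List Char)
    (h1 : c ≠ tok) (h2 : c ≠ '\\') :
    rep2 tok r ('\\' :: c :: t) = '\\' :: c :: rep2 tok r t := by
  rw [rep2_bs_cons tok r (c :: t) (by simp [h1]), rep2_cons_ne tok r c t h2]

-- A's six passes, innermost first, as list functions
def chainAll (l : List Char) : List Char :=
  rep2 'S' "[^[:space:]]".toList (rep2 's' "[[:space:]]".toList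
    (rep2 'W' "[^[:alnum:]_]".toList (rep2 'w' "[[:alnum:]_]".toList
      (rep2 'D' "[^0-9]".toList (rep2 'd' "[0-9]".toList l)))))

theorem chain_scan : ∀ (n : Nat) (l : List Char), l.length ≤ n → chainAll l = pvScan l := by
  intro n
  induction n with
  | zero => intro l h; have : l = [] := by simpa using h
            subst this; rfl
  | succ n ih =>
    intro l h
    match l with
    | [] => rfl
    | [a] => simp [chainAll, rep2, pvScan]
    | a :: b :: t =>
      have ht : t.length ≤ n := by simp at h; omega
      have hbt : (b :: t).length ≤ n := by simp at h ⊢; omega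
      by_cases ha : a = '\\'
      · subst ha
        by_cases hd : b = 'd'
        · subst hd
          simp only [chainAll, rep2_match]
          rw [rep2_append 'D' _ _ _ (by decide), rep2_append 'w' _ _ _ (by decide),
              rep2_append 'W' _ _ _ (by decide), rep2_append 's' _ _ _ (by decide),
              rep2_append 'S' _ _ _ (by decide)]
          rw [show rep2 'S' "[^[:space:]]".toList (rep2 's' "[[:space:]]".toList
                (rep2 'W' "[^[:alnum:]_]".toList (rep2 'w' "[[:alnum:]_]".toList
                  (rep2 'D' "[^0-9]".toList (rep2 'd' "[0-9]".toList t))))) = chainAll t from rfl,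
              ih t ht]
          simp [pvScan, pvConvGet?]
        · by_cases hD : b = 'D'
          · subst hD
            simp only [chainAll, pass_through 'd' _ 'D' _ (by decide) (by decide), rep2_match]
            rw [rep2_append 'w' _ _ _ (by decide), rep2_append 'W' _ _ _ (by decide),
                rep2_append 's' _ _ _ (by decide), rep2_append 'S' _ _ _ (by decide)]
            have := ih t ht
            simp only [chainAll] at this
            rw [this]
            simp [pvScan, pvConvGet?]
          · by_cases hw : b = 'w'
            · subst hw
              simp only [chainAll, pass_through 'd' _ 'w' _ (by decide) (by decide),
                pass_through 'D' _ 'w' _ (by decide) (by decide), rep2_match]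
              rw [rep2_append 'W' _ _ _ (by decide), rep2_append 's' _ _ _ (by decide),
                  rep2_append 'S' _ _ _ (by decide)]
              have := ih t ht
              simp only [chainAll] at this
              rw [this]
              simp [pvScan, pvConvGet?]
            · by_cases hW : b = 'W'
              · subst hW
                simp only [chainAll, pass_through 'd' _ 'W' _ (by decide) (by decide),
                  pass_through 'D' _ 'W' _ (by decide) (by decide),
                  pass_through 'w' _ 'W' _ (by decide) (by decide), rep2_match]
                rw [rep2_append 's' _ _ _ (by decide), rep2_append 'S' _ _ _ (by decide)]
                have := ih t ht
                simp only [chainAll] at this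
                rw [this]
                simp [pvScan, pvConvGet?]
              · by_cases hs : b = 's'
                · subst hs
                  simp only [chainAll, pass_through 'd' _ 's' _ (by decide) (by decide),
                    pass_through 'D' _ 's' _ (by decide) (by decide),
                    pass_through 'w' _ 's' _ (by decide) (by decide),
                    pass_through 'W' _ 's' _ (by decide) (by decide), rep2_match]
                  rw [rep2_append 'S' _ _ _ (by decide)]
                  have := ih t ht
                  simp only [chainAll] at this
                  rw [this]
                  simp [pvScan, pvConvGet?]
                · by_cases hS : b = 'S'
                  · subst hS
                    simp only [chainAll, pass_through 'd' _ 'S' _ (by decide) (by decide),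
                      pass_through 'D' _ 'S' _ (by decide) (by decide),
                      pass_through 'w' _ 'S' _ (by decide) (by decide),
                      pass_through 'W' _ 'S' _ (by decide) (by decide),
                      pass_through 's' _ 'S' _ (by decide) (by decide), rep2_match]
                    have := ih t ht
                    simp only [chainAll] at this
                    rw [this]
                    simp [pvScan, pvConvGet?]
                  · by_cases hbs : b = '\\'
                    · subst hbs
                      -- every pass skips the first backslash; heads of intermediates are '\\' or '['
                      have hd1 : (rep2 'd' "[0-9]".toList ('\\' :: t)).head? = some '\\' ∨
                          (rep2 'd' "[0-9]".toList ('\\' :: t)).head? = some '[' := by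
                        rcases rep2_head 'd' "[0-9]".toList ('\\' :: t) (by decide) with h1 | h1
                        · left; simpa using h1
                        · right; simpa using h1
                      have hd2 : (rep2 'D' "[^0-9]".toList (rep2 'd' "[0-9]".toList ('\\' :: t))).head? = some '\\' ∨
                          (rep2 'D' "[^0-9]".toList (rep2 'd' "[0-9]".toList ('\\' :: t))).head? = some '[' := by
                        rcases rep2_head 'D' "[^0-9]".toList _ (by decide) with h1 | h1
                        · rw [h1]; exact hd1
                        · right; simpa using h1
                      have hd3 : (rep2 'w' "[[:alnum:]_]".toList (rep2 'D' "[^0-9]".toList (rep2 'd' "[0-9]".toList ('\\' :: t)))).head? = some '\\' ∨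
                          (rep2 'w' "[[:alnum:]_]".toList (rep2 'D' "[^0-9]".toList (rep2 'd' "[0-9]".toList ('\\' :: t)))).head? = some '[' := by
                        rcases rep2_head 'w' "[[:alnum:]_]".toList _ (by decide) with h1 | h1
                        · rw [h1]; exact hd2
                        · right; simpa using h1
                      have hd4 : (rep2 'W' "[^[:alnum:]_]".toList (rep2 'w' "[[:alnum:]_]".toList (rep2 'D' "[^0-9]".toList (rep2 'd' "[0-9]".toList ('\\' :: t))))).head? = some '\\' ∨
                          (rep2 'W' "[^[:alnum:]_]".toList (rep2 'w' "[[:alnum:]_]".toList (rep2 'D' "[^0-9]".toList (rep2 'd' "[0-9]".toList ('\\' :: t))))).head? = some '[' := by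
                        rcases rep2_head 'W' "[^[:alnum:]_]".toList _ (by decide) with h1 | h1
                        · rw [h1]; exact hd3
                        · right; simpa using h1
                      have hd5 : (rep2 's' "[[:space:]]".toList (rep2 'W' "[^[:alnum:]_]".toList (rep2 'w' "[[:alnum:]_]".toList (rep2 'D' "[^0-9]".toList (rep2 'd' "[0-9]".toList ('\\' :: t)))))).head? = some '\\' ∨
                          (rep2 's' "[[:space:]]".toList (rep2 'W' "[^[:alnum:]_]".toList (rep2 'w' "[[:alnum:]_]".toList (rep2 'D' "[^0-9]".toList (rep2 'd' "[0-9]".toList ('\\' :: t)))))).head? = some '[' := by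
                        rcases rep2_head 's' "[[:space:]]".toList _ (by decide) with h1 | h1
                        · rw [h1]; exact hd4
                        · right; simpa using h1
                      simp only [chainAll]
                      rw [rep2_bs_cons 'd' _ ('\\' :: t) (by simp),
                          rep2_bs_cons 'D' _ _ (by rcases hd1 with h1 | h1 <;> rw [h1] <;> simp),
                          rep2_bs_cons 'w' _ _ (by rcases hd2 with h1 | h1 <;> rw [h1] <;> simp),
                          rep2_bs_cons 'W' _ _ (by rcases hd3 with h1 | h1 <;> rw [h1] <;> simp),
                          rep2_bs_cons 's' _ _ (by rcases hd4 with h1 | h1 <;> rw [h1] <;> simp),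
                          rep2_bs_cons 'S' _ _ (by rcases hd5 with h1 | h1 <;> rw [h1] <;> simp)]
                      have := ih ('\\' :: t) hbt
                      simp only [chainAll] at this
                      rw [this]
                      simp [pvScan, pvConvGet?]
                    · -- b is neither a token letter nor a backslash
                      simp only [chainAll,
                        pass_through 'd' _ b _ (by simpa using hd) hbs,
                        pass_through 'D' _ b _ (by simpa using hD) hbs,
                        pass_through 'w' _ b _ (by simpa using hw) hbs,
                        pass_through 'W' _ b _ (by simpa using hW) hbs,
                        pass_through 's' _ b _ (by simpa using hs) hbs,
                        pass_through 'S' _ b _ (by simpa using hS) hbs]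
                      have := ih t ht
                      simp only [chainAll] at this
                      rw [this]
                      have hb2 : pvScan ('\\' :: b :: t) = '\\' :: pvScan (b :: t) := by
                        simp [pvScan, pvConvGet?, hd, hD, hw, hW, hs, hS]
                      rw [hb2, show pvScan (b :: t) = b :: pvScan t by
                        cases t <;> simp [pvScan, pvConvGet?, hbs]]
      · -- a is not a backslash: every pass and the scan emit a and continue
        simp only [chainAll,
          rep2_cons_ne 'd' _ a _ ha]
        rw [rep2_cons_ne 'D' _ a _ ha, rep2_cons_ne 'w' _ a _ ha, rep2_cons_ne 'W' _ a _ ha,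
            rep2_cons_ne 's' _ a _ ha, rep2_cons_ne 'S' _ a _ ha]
        have := ih (b :: t) hbt
        simp only [chainAll] at this
        rw [this]
        simp [pvScan, pvConvGet?, ha]

theorem ports_eq (pattern : String) :
    convert_perl_to_posix_regex_py pattern = convert_perl_to_posix_regex_py_alt pattern := by
  unfold convert_perl_to_posix_regex_py convert_perl_to_posix_regex_py_alt
  simp only [PySem.Str.replace, String.toList_ofList]
  congr 1
  rw [show ("\\d" : String).toList = ['\\', 'd'] from rfl,
      show ("\\D" : String).toList = ['\\', 'D'] from rfl,
      show ("\\w" : String).toList = ['\\', 'w'] from rfl,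
      show ("\\W" : String).toList = ['\\', 'W'] from rfl,
      show ("\\s" : String).toList = ['\\', 's'] from rfl,
      show ("\\S" : String).toList = ['\\', 'S'] from rfl,
      replace_eq_rep2, replace_eq_rep2, replace_eq_rep2,
      replace_eq_rep2, replace_eq_rep2, replace_eq_rep2]
  exact chain_scan pattern.toList.length pattern.toList le_rfl

-- ===== VERDICT (by name: the statement is the Claim_ definition above) =====
theorem convert_perl_to_posix_regex_py_spec : Claim_equal_convert_perl_to_posix_regex_py := by
  intro pattern _
  exact ports_eq pattern
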